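-- pv_equiv track=rewrite | github.com/moidshaikh/advent_of_code | solutions/2025/day06.py | get_problem_groups
-- ===== SOURCE A (Python) =====
-- def get_problem_groups(data: list[str]) -> list[dict[str, list[str]]]:
--     """
--     Splits the grid into blocks based on empty columns and returns a list
--     of dictionaries containing the operator and the rows for that block.
--     """
--     # 1. Pad all lines to the same length
--     max_len = max(len(line) for line in data)
--     padded_data = [line.ljust(max_len) for line in data]
--
--     # 2. Identify indices of empty columns (separators)
--     # zip(*padded_data) transposes rows to columns
--     cols = list(zip(*padded_data))
--     empty_col_indices = [i for i, col in enumerate(cols) if all(c == " " for c in col)]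
--
--     # Add start (0) and end (max_len) to indices to help slicing
--     # We want ranges between separators
--     boundaries = [-1] + empty_col_indices + [max_len]
--
--     problem_groups = []
--
--     # 3. Iterate through boundaries to slice blocks
--     for k in range(len(boundaries) - 1):
--         start = boundaries[k] + 1
--         end = boundaries[k + 1]
--
--         # Skip if start >= end (consecutive spaces)
--         if start >= end:
--             continue
--
--         # Extract the rectangular block for this section
--         block_rows = [row[start:end] for row in padded_data]
--
--         # 4. Extract operator and number rows
--         # The operator is in the last row of the block
--         operator_row = block_rows[-1].strip()
--         if not operator_row:
--             continue  # Skip if purely empty block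
--
--         # The operator is usually the single non-space char in the last row
--         operator = operator_row.strip()
--
--         # The numbers are in all rows except the last one
--         number_rows = block_rows[:-1]
--
--         problem_groups.append({operator: number_rows})
--
--     return problem_groups
-- ===== SOURCE B (Python) =====
-- def get_problem_groups(data: list[str]) -> list[dict[str, list[str]]]:
--     """Single left-to-right scan over columns: walk maximal runs of
--     non-empty columns directly instead of collecting empty-column
--     boundary indices first."""
--     width = max((len(line) for line in data), default=0)
--
--     def col_empty(j):
--         return all(j >= len(row) or row[j] == " " for row in data)
--
--     groups = []
--     j = 0
--     while j < width:
--         if col_empty(j):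
--             j += 1
--             continue
--         start = j
--         j += 1
--         while j < width and not col_empty(j):
--             j += 1
--         block = [row[start:j].ljust(j - start) for row in data]
--         op = block[-1].strip()
--         if op:
--             groups.append({op: block[:-1]})
--     return groups
-- ===== Notes on version B (the rewrite author's own statement) =====
-- stated objective: alternative
-- what changed: Replaces A's transpose + empty-column-index list + sentinel boundary pairs with a single left-to-right column scan that walks maximal runs of non-empty columns and slices each block directly, never materialising the transposed grid or the boundary list.
-- outside the precondition, e.g. on get_problem_groups([]): A raises ValueError, B returns []
import Mathlib
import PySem

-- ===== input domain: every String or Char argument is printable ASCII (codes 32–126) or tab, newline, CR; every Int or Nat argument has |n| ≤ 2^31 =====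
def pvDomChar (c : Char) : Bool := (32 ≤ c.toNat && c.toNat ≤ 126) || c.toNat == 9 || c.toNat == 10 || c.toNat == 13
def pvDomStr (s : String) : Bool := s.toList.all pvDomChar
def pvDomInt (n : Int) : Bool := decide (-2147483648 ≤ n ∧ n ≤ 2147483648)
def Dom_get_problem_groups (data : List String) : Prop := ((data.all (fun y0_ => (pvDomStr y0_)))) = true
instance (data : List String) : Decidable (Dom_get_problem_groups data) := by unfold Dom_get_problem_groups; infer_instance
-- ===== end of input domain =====

-- B replaces A's transpose + empty-column-index list + sentinel boundary pairs by one left-to-right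
-- column scan over maximal runs of non-empty columns (alternative decomposition, same cost).

-- ===== PORT A =====
-- zip(*rows): exact for the call site (all rows padded to the same length maxLen = the fuel)
def pyZipN : Nat → List (List Char) → List (List Char)
  | 0, _ => []
  | n+1, rows =>
    if rows.isEmpty || rows.any (fun r => r.isEmpty) then []
    else (rows.map (fun r => r.headD ' ')) :: pyZipN n (rows.map (fun r => r.tail))

-- line.ljust(w): s + ' ' * (w - len(s)), exact
def pyLjust (cs : List Char) (w : Nat) : List Char := cs ++ List.replicate (w - cs.length) ' '

def get_problem_groups (data : List String) : List (List (String × List String)) :=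
  match PySem.List.max? (data.map (fun line => PySem.Str.len line)) (fun x => x) with
  | none => []   -- max() raises ValueError here: data = [] is excluded by Pre_
  | some maxLenI =>
    let maxLen : Nat := maxLenI.toNat
    let padded : List (List Char) := data.map (fun line => pyLjust line.toList maxLen)
    let cols : List (List Char) := pyZipN maxLen padded
    let emptyColIndices : List Int :=
      ((PySem.List.enumerate cols 0).filter (fun p => p.2.all (fun c => c == ' '))).map (fun p => p.1)
    let boundaries : List Int := [-1] ++ emptyColIndices ++ [maxLenI]
    (PySem.List.pyRange 0 ((boundaries.length : Int) - 1)).foldl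
      (fun acc k =>
        let start := PySem.List.pyGetD boundaries k 0 + 1
        let stop  := PySem.List.pyGetD boundaries (k + 1) 0
        if start ≥ stop then acc
        else
          let blockRows := padded.map (fun row => PySem.List.slice row (some start) (some stop))
          let operatorRow := PySem.Chars.strip (PySem.List.pyGetD blockRows (-1) [])
          if operatorRow.isEmpty then acc
          else
            let operator := PySem.Chars.strip operatorRow
            let numberRows := PySem.List.slice blockRows none (some (-1))
            acc ++ [[(String.ofList operator, numberRows.map (fun r => String.ofList r))]]) []

-- ===== PORT B =====
-- col_empty(j): all(j >= len(row) or row[j] == ' ' for row in data)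
def colEmptyB (rows : List (List Char)) (j : Nat) : Bool :=
  rows.all (fun row => decide (row.length ≤ j) || (row.getD j ' ' == ' '))

-- the inner 'while j < width and not col_empty(j): j += 1'
def bRunEnd (rows : List (List Char)) (w : Nat) (j : Nat) : Nat :=
  if j < w ∧ colEmptyB rows j = false then bRunEnd rows w (j + 1) else j
  termination_by w - j
  decreasing_by omega

theorem le_bRunEnd (rows : List (List Char)) (w : Nat) (j : Nat) : j ≤ bRunEnd rows w j := by
  fun_induction bRunEnd <;> omega

-- the outer 'while j < width' scan emitting one block per maximal run of non-empty columns
def bScan (rows : List (List Char)) (w : Nat) (j : Nat) : List (List (String × List String)) :=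
  if j < w then
    if colEmptyB rows j then bScan rows w (j + 1)
    else
      let e := bRunEnd rows w (j + 1)
      let block := rows.map (fun row =>
        pyLjust (PySem.List.slice row (some (j : Int)) (some (e : Int))) (e - j))
      let op := PySem.Chars.strip (PySem.List.pyGetD block (-1) [])
      (if op.isEmpty then []
       else [[(String.ofList op, (PySem.List.slice block none (some (-1))).map (fun r => String.ofList r))]])
        ++ bScan rows w e
  else []
  termination_by w - j
  decreasing_by
  · omega
  · have := le_bRunEnd rows w (j + 1); omega

def get_problem_groups_alt (data : List String) : List (List (String × List String)) :=
  let w : Nat := (PySem.List.maxD (data.map (fun line => PySem.Str.len line)) (fun x => x) 0).toNat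
  bScan (data.map (fun line => line.toList)) w 0

-- ===== PRECONDITION & SPEC =====
-- Pre_ excludes only data = [], where Python's max() raises ValueError.
def Pre_get_problem_groups (data : List String) : Prop := data ≠ []
instance (data : List String) : Decidable (Pre_get_problem_groups data) := by
  unfold Pre_get_problem_groups; infer_instance
def pvWitness_get_problem_groups : List String := ["1 2", "+ *"]

def Spec_get_problem_groups (data : List String) (out : List (List (String × List String))) : Prop :=
  out = get_problem_groups_alt data
instance (data : List String) (out : List (List (String × List String))) :
    Decidable (Spec_get_problem_groups data out) := by unfold Spec_get_problem_groups; infer_instance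

-- ===== CLAIM (what is proved, stated in full; the proofs are below) =====
def Claim_equal_get_problem_groups : Prop := ∀ (data : List String), Dom_get_problem_groups data →
  Pre_get_problem_groups data → Spec_get_problem_groups data (get_problem_groups data)


-- ===== LEMMAS AND PROOFS =====

-- strip is idempotent (A strips the operator row twice, B once)
theorem dropWhile_of_prefix {α : Type} (p : α → Bool) (l u : List α)
    (h : List.dropWhile p l = l) (hu : u <+: l) : List.dropWhile p u = u := by
  rcases u with _ | ⟨x, u'⟩
  · simp
  · rcases hu with ⟨t, ht⟩
    subst ht
    rw [List.dropWhile_eq_self_iff] at h ⊢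
    intro _
    exact h (by simp)

theorem rstrip_prefix (s : List Char) : PySem.Chars.rstrip s <+: s := by
  have h := List.dropWhile_suffix (l := s.reverse) PySem.Chars.isspace
  have := h.reverse
  simpa [PySem.Chars.rstrip] using this

theorem strip_strip (s : List Char) :
    PySem.Chars.strip (PySem.Chars.strip s) = PySem.Chars.strip s := by
  show PySem.Chars.rstrip (PySem.Chars.lstrip (PySem.Chars.rstrip (PySem.Chars.lstrip s)))
      = PySem.Chars.rstrip (PySem.Chars.lstrip s)
  have h1 : PySem.Chars.lstrip (PySem.Chars.rstrip (PySem.Chars.lstrip s))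
      = PySem.Chars.rstrip (PySem.Chars.lstrip s) := by
    apply dropWhile_of_prefix _ (PySem.Chars.lstrip s)
    · exact List.dropWhile_idempotent _ s
    · exact rstrip_prefix _
  rw [h1]
  simp [PySem.Chars.rstrip, List.dropWhile_idempotent]

theorem pyLjust_length (r : List Char) (w : Nat) (h : r.length ≤ w) :
    (pyLjust r w).length = w := by
  simp [pyLjust]; omega

-- zip(*rows) on nonempty rows of equal length n is the transpose
theorem pyZipN_eq (n : Nat) : ∀ rows : List (List Char), rows ≠ [] →
    (∀ r ∈ rows, r.length = n) →
    pyZipN n rows = (List.range n).map (fun j => rows.map (fun r => r.getD j ' ')) := by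
  induction n with
  | zero => intro rows _ _; simp [pyZipN]
  | succ n ih =>
    intro rows hne hlen
    have h1 : rows.isEmpty = false := by simpa [List.isEmpty_iff] using hne
    have h2 : (rows.any (fun r => r.isEmpty)) = false := by
      simp only [List.any_eq_false]
      intro r hr hem
      have := hlen r hr
      rw [List.isEmpty_iff] at hem
      simp [hem] at this
    rw [pyZipN, h1, h2]
    rw [if_neg (by simp)]
    rw [List.range_succ_eq_map, List.map_cons, List.map_map]
    have hhead : rows.map (fun r => r.headD ' ') = rows.map (fun r => r.getD 0 ' ') := by
      apply List.map_congr_left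
      intro r hr
      have := hlen r hr
      rcases r with _ | ⟨x, r'⟩
      · simp at this
      · simp
    have htail : pyZipN n (rows.map (fun r => r.tail))
        = (List.range n).map ((fun j => rows.map (fun r => r.getD j ' ')) ∘ Nat.succ) := by
      rw [ih (rows.map (fun r => r.tail)) (by simpa using hne)
        (by intro r hr; simp only [List.mem_map] at hr; obtain ⟨r', hr', rfl⟩ := hr
            have := hlen r' hr'; simp [this])]
      apply List.map_congr_left
      intro j _
      simp only [Function.comp_apply, List.map_map]
      apply List.map_congr_left
      intro r hr
      have := hlen r hr
      rcases r with _ | ⟨x, r'⟩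
      · simp at this
      · simp
    rw [hhead, htail]

-- enumerate + filter + fst over a mapped range' is the filtered range'
theorem enumFilterFst {α : Type} (f : Nat → α) (p : α → Bool) :
    ∀ (n c : Nat),
    ((PySem.List.enumerate ((List.range' c n).map f) (c : Int)).filter (fun q => p q.2)).map Prod.fst
      = ((List.range' c n).filter (fun j => p (f j))).map (fun j : Nat => (j : Int)) := by
  intro n
  induction n with
  | zero => intro c; simp [PySem.List.enumerate_nil]
  | succ n ih =>
    intro c
    rw [List.range'_succ]
    simp only [List.map_cons, PySem.List.enumerate_cons, List.filter_cons]
    rw [show ((c : Int) + 1) = ((c + 1 : Nat) : Int) by push_cast; ring]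
    by_cases hp : p (f c)
    · simp only [hp, if_true, List.map_cons, ih (c + 1)]
    · simp only [hp, Bool.false_eq_true, if_false, ih (c + 1)]

-- per-cell bridge: a padded row is blank at j iff the raw row is short or blank there
theorem padded_getD_blank (r : List Char) (w j : Nat) (hr : r.length ≤ w) (hj : j < w) :
    (((pyLjust r w).getD j ' ') == ' ') = (decide (r.length ≤ j) || (r.getD j ' ' == ' ')) := by
  by_cases h : j < r.length
  · rw [pyLjust, List.getD_append _ _ _ _ h]
    simp [Nat.not_le.mpr h]
  · rw [pyLjust, List.getD_append_right _ _ _ _ (by omega), List.getD_replicate _ (by omega)]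
    simp [Nat.le_of_not_lt h]

theorem colTest_eq (rows : List (List Char)) (w j : Nat) (hj : j < w)
    (hlen : ∀ r ∈ rows, r.length ≤ w) :
    ((rows.map (fun r => pyLjust r w)).map (fun r => r.getD j ' ')).all (fun c => c == ' ')
      = colEmptyB rows j := by
  rw [List.map_map, colEmptyB, List.all_map]
  induction rows with
  | nil => rfl
  | cons r rs ihr =>
    simp only [List.all_cons, Function.comp_apply]
    rw [padded_getD_blank r w j (hlen r (by simp)) hj,
      ihr (fun x hx => hlen x (by simp [hx]))]

-- the boundary-pair loop over indices is a walk over adjacent elements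
def adjF {beta : Type} (g : beta → Int → Int → beta) : beta → List Int → beta
  | acc, a :: b :: t => adjF g (g acc a b) (b :: t)
  | acc, _ => acc

theorem adjF_eq {beta : Type} (g : beta → Int → Int → beta) :
    ∀ (t : List Int) (a : Int) (init : beta),
    ((List.range t.length).map (fun k => ((k : Nat) : Int))).foldl
      (fun acc k => g acc (PySem.List.pyGetD (a :: t) k 0) (PySem.List.pyGetD (a :: t) (k + 1) 0)) init
      = adjF g init (a :: t) := by
  intro t
  induction t with
  | nil => intro a init; simp [adjF]
  | cons b t ih =>
    intro a init
    show ((List.range (t.length + 1)).map _).foldl _ _ = _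
    rw [List.range_succ_eq_map, List.map_cons, List.foldl_cons, List.map_map]
    have e0 : PySem.List.pyGetD (a :: b :: t) ((0 : Nat) : Int) 0 = a := by
      rw [PySem.List.pyGetD_natCast]
      simp
    have e1 : PySem.List.pyGetD (a :: b :: t) (((0 : Nat) : Int) + 1) 0 = b := by
      have : (((0 : Nat) : Int) + 1) = ((1 : Nat) : Int) := by omega
      rw [this, PySem.List.pyGetD_natCast]
      all_goals simp
    rw [e0, e1]
    have hfun : ((fun k => ((k : Nat) : Int)) ∘ Nat.succ) = fun k : Nat => (((k + 1 : Nat)) : Int) := by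
      funext k; simp
    rw [hfun]
    have : ∀ (init' : beta),
        ((List.range t.length).map (fun k : Nat => ((k + 1 : Nat) : Int))).foldl
          (fun acc k => g acc (PySem.List.pyGetD (a :: b :: t) k 0)
            (PySem.List.pyGetD (a :: b :: t) (k + 1) 0)) init'
        = ((List.range t.length).map (fun k : Nat => ((k : Nat) : Int))).foldl
          (fun acc k => g acc (PySem.List.pyGetD (b :: t) k 0)
            (PySem.List.pyGetD (b :: t) (k + 1) 0)) init' := by
      intro init'
      rw [List.foldl_map, List.foldl_map]
      apply PySem.List.foldl_congr_mem
      intro acc k _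
      have g1 : PySem.List.pyGetD (a :: b :: t) ((k + 1 : Nat) : Int) 0
          = PySem.List.pyGetD (b :: t) ((k : Nat) : Int) 0 := by
        rw [PySem.List.pyGetD_natCast, PySem.List.pyGetD_natCast]
        simp
      have g2 : PySem.List.pyGetD (a :: b :: t) (((k + 1 : Nat) : Int) + 1) 0
          = PySem.List.pyGetD (b :: t) (((k : Nat) : Int) + 1) 0 := by
        have ha : (((k + 1 : Nat) : Int) + 1) = ((k + 2 : Nat) : Int) := by omega
        have hb : (((k : Nat) : Int) + 1) = ((k + 1 : Nat) : Int) := by omega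
        rw [ha, hb, PySem.List.pyGetD_natCast, PySem.List.pyGetD_natCast]
        all_goals simp
      rw [g1, g2]
    rw [this]
    exact ih b (g init a b)

theorem foldA_eq {beta : Type} (g : beta → Int → Int → beta) (bs : List Int) (init : beta)
    (h : bs ≠ []) :
    (PySem.List.pyRange 0 ((bs.length : Int) - 1)).foldl
      (fun acc k => g acc (PySem.List.pyGetD bs k 0) (PySem.List.pyGetD bs (k + 1) 0)) init
      = adjF g init bs := by
  obtain ⟨a, t, rfl⟩ := List.exists_cons_of_ne_nil h
  have hl : (((a :: t).length : Int) - 1) = ((t.length : Nat) : Int) := by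
    simp
  rw [hl, PySem.List.pyRange_zero_natCast]
  exact adjF_eq g t a init

-- slicing a padded row = padding the sliced raw row
theorem ljust_slice (r : List Char) (w s e : Nat) (hr : r.length ≤ w) (hse : s ≤ e)
    (hew : e ≤ w) :
    List.take (e - s) (List.drop s (pyLjust r w)) = pyLjust (List.take (e - s) (List.drop s r)) (e - s) := by
  apply List.ext_getElem
  · simp only [List.length_take, List.length_drop, pyLjust, List.length_append,
      List.length_replicate]
    omega
  · intro i h1 h2
    have hie : i < e - s := by
      simp only [pyLjust, List.length_take, List.length_drop, List.length_append,
        List.length_replicate] at h1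
      omega
    rw [List.getElem_take, List.getElem_drop]
    simp only [pyLjust]
    rw [List.getElem_append, List.getElem_append]
    by_cases hil : s + i < r.length
    · have hi2 : i < (List.take (e - s) (List.drop s r)).length := by
        simp only [List.length_take, List.length_drop]; omega
      rw [dif_pos hil, dif_pos hi2, List.getElem_take, List.getElem_drop]
    · have hi2 : ¬ i < (List.take (e - s) (List.drop s r)).length := by
        simp only [List.length_take, List.length_drop]; omega
      rw [dif_neg hil, dif_neg hi2]
      simp [List.getElem_replicate]

-- specification of the inner while loop
theorem bRunEnd_spec (rows : List (List Char)) (w : Nat) : ∀ j : Nat, j ≤ w →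
    j ≤ bRunEnd rows w j ∧ bRunEnd rows w j ≤ w ∧
    (∀ k, j ≤ k → k < bRunEnd rows w j → colEmptyB rows k = false) ∧
    (bRunEnd rows w j = w ∨ colEmptyB rows (bRunEnd rows w j) = true) := by
  intro j
  fun_induction bRunEnd rows w j with
  | case1 j hcond ih =>
    intro hj
    obtain ⟨h1, h2, h3, h4⟩ := ih (by omega)
    refine ⟨by omega, h2, ?_, h4⟩
    intro k hk1 hk2
    rcases Nat.eq_or_lt_of_le hk1 with rfl | hk
    · exact hcond.2
    · exact h3 k (by omega) hk2
  | case2 j hcond =>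
    intro hj
    refine ⟨le_refl _, hj, by omega, ?_⟩
    rcases Nat.lt_or_ge j w with h | h
    · right
      by_cases hE : colEmptyB rows j = true
      · exact hE
      · exact absurd ⟨h, by simpa using hE⟩ hcond
    · left; omega

theorem filter_range'_skip (E : Nat → Bool) (c e w : Nat) (hce : c ≤ e) (hew : e ≤ w)
    (h : ∀ k, c ≤ k → k < e → E k = false) :
    (List.range' c (w - c)).filter E = (List.range' e (w - e)).filter E := by
  have hsplit : List.range' c (w - c) = List.range' c (e - c) ++ List.range' e (w - e) := by
    have := List.range'_append (s := c) (m := e - c) (n := w - e) (step := 1)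
    rw [show c + 1 * (e - c) = e by omega, show (e - c) + (w - e) = w - c by omega] at this
    exact this.symm
  rw [hsplit, List.filter_append]
  have : (List.range' c (e - c)).filter E = [] := by
    rw [List.filter_eq_nil_iff]
    intro k hk
    rw [List.mem_range'_1] at hk
    simp [h k hk.1 (by omega)]
  rw [this, List.nil_append]

-- A's loop body as a function of the two adjacent boundary values
def gA (rows : List (List Char)) (w : Nat)
    (acc : List (List (String × List String))) (s t : Int) : List (List (String × List String)) :=
  let start := s + 1
  let stop := t
  if start ≥ stop then acc
  else
    let blockRows := (rows.map (fun r => pyLjust r w)).map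
      (fun row => PySem.List.slice row (some start) (some stop))
    let operatorRow := PySem.Chars.strip (PySem.List.pyGetD blockRows (-1) [])
    if operatorRow.isEmpty then acc
    else
      let operator := PySem.Chars.strip operatorRow
      let numberRows := PySem.List.slice blockRows none (some (-1))
      acc ++ [[(String.ofList operator, numberRows.map (fun r => String.ofList r))]]

-- the part bScan emits for one run [c, e)
def bEntry (rows : List (List Char)) (c e : Nat) : List (List (String × List String)) :=
  let block := rows.map (fun row =>
    pyLjust (PySem.List.slice row (some (c : Int)) (some (e : Int))) (e - c))
  let op := PySem.Chars.strip (PySem.List.pyGetD block (-1) [])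
  if op.isEmpty then []
  else [[(String.ofList op, (PySem.List.slice block none (some (-1))).map (fun r => String.ofList r))]]

theorem adjF_cons {beta : Type} (g : beta → Int → Int → beta) (acc : beta) (a b : Int)
    (t : List Int) : adjF g acc (a :: b :: t) = adjF g (g acc a b) (b :: t) := by
  rw [adjF]

theorem adjF_single {beta : Type} (g : beta → Int → Int → beta) (acc : beta) (a : Int) :
    adjF g acc [a] = acc := rfl

theorem gA_skip (rows : List (List Char)) (w : Nat) (acc : List (List (String × List String)))
    (s t : Int) (h : s + 1 ≥ t) : gA rows w acc s t = acc := by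
  simp only [gA]
  rw [if_pos h]

theorem gA_emit (rows : List (List Char)) (w c e : Nat) (hlen : ∀ r ∈ rows, r.length ≤ w)
    (hce : c < e) (hew : e ≤ w) (acc : List (List (String × List String))) :
    gA rows w acc ((c : Int) - 1) (e : Int) = acc ++ bEntry rows c e := by
  simp only [gA]
  rw [show ((c : Int) - 1 + 1) = (c : Int) from by ring]
  rw [if_neg (by omega)]
  have hblock : (rows.map (fun r => pyLjust r w)).map
      (fun row => PySem.List.slice row (some (c : Int)) (some (e : Int)))
      = rows.map (fun row =>
          pyLjust (PySem.List.slice row (some (c : Int)) (some (e : Int))) (e - c)) := by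
    rw [List.map_map]
    apply List.map_congr_left
    intro r hr
    simp only [Function.comp_apply, PySem.List.slice_natCast]
    exact ljust_slice r w c e (hlen r hr) (le_of_lt hce) hew
  rw [hblock, strip_strip]
  simp only [bEntry]
  split_ifs with hop
  · simp
  · rfl

-- one bScan step at a non-empty column
theorem bScan_emit (rows : List (List Char)) (w c : Nat) (hc : c < w)
    (hE : ¬ colEmptyB rows c = true) :
    bScan rows w c = bEntry rows c (bRunEnd rows w (c + 1)) ++ bScan rows w (bRunEnd rows w (c + 1)) := by
  rw [bScan, if_pos hc, if_neg hE]
  rfl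

theorem bScan_stop (rows : List (List Char)) (w c : Nat) (hc : ¬ c < w) :
    bScan rows w c = [] := by
  rw [bScan, if_neg hc]

theorem bScan_skip (rows : List (List Char)) (w c : Nat) (hc : c < w)
    (hE : colEmptyB rows c = true) : bScan rows w c = bScan rows w (c + 1) := by
  rw [bScan, if_pos hc, if_pos hE]

-- MAIN LEMMA: A's boundary-pair walk equals B's column scan
theorem scan_eq (rows : List (List Char)) (w : Nat) (hlen : ∀ r ∈ rows, r.length ≤ w) :
    ∀ (n c : Nat) (acc : List (List (String × List String))), w - c ≤ n →
    adjF (gA rows w) acc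
      (((c : Int) - 1) ::
        ((((List.range' c (w - c)).filter (colEmptyB rows)).map (fun j : Nat => (j : Int))) ++ [(w : Int)]))
      = acc ++ bScan rows w c := by
  intro n
  induction n with
  | zero =>
    intro c acc h
    have hcw : ¬ c < w := by omega
    rw [show w - c = 0 from by omega]
    simp only [List.range'_zero, List.filter_nil, List.map_nil, List.nil_append]
    rw [adjF_cons, adjF_single, gA_skip _ _ _ _ _ (by omega), bScan_stop _ _ _ hcw,
      List.append_nil]
  | succ n ih =>
    intro c acc h
    by_cases hc : c < w
    · by_cases hE : colEmptyB rows c = true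
      · rw [show w - c = (w - (c + 1)) + 1 from by omega, List.range'_succ, List.filter_cons]
        rw [if_pos hE, List.map_cons, List.cons_append, adjF_cons,
          gA_skip _ _ _ _ _ (by omega)]
        rw [show ((c : Nat) : Int) = (((c + 1 : Nat) : Int) - 1) from by push_cast; ring]
        rw [ih (c + 1) acc (by omega), bScan_skip _ _ _ hc hE]
      · have hc1 : c + 1 ≤ w := hc
        rw [bScan_emit rows w c hc hE]
        obtain ⟨h1, h2, h3, h4⟩ := bRunEnd_spec rows w (c + 1) hc1
        generalize he : bRunEnd rows w (c + 1) = e at h1 h2 h3 h4 ⊢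
        have hrun : ∀ k, c ≤ k → k < e → colEmptyB rows k = false := by
          intro k hk1 hk2
          rcases Nat.eq_or_lt_of_le hk1 with rfl | hk
          · simpa using hE
          · exact h3 k hk hk2
        rw [filter_range'_skip (colEmptyB rows) c e w (by omega) h2 hrun]
        rcases Nat.eq_or_lt_of_le h2 with hew | hew
        · subst hew
          simp only [Nat.sub_self, List.range'_zero, List.filter_nil, List.map_nil,
            List.nil_append]
          rw [adjF_cons, adjF_single, gA_emit rows e c e hlen (by omega) (le_refl e) acc,
            bScan_stop rows e e (by omega), List.append_nil]
        · have hEe : colEmptyB rows e = true := by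
            rcases h4 with h4 | h4
            · omega
            · exact h4
          rw [show w - e = (w - (e + 1)) + 1 from by omega, List.range'_succ, List.filter_cons]
          rw [if_pos hEe, List.map_cons, List.cons_append, adjF_cons,
            gA_emit rows w c e hlen (by omega) (by omega) acc]
          rw [show ((e : Nat) : Int) = (((e + 1 : Nat) : Int) - 1) from by push_cast; ring]
          rw [ih (e + 1) (acc ++ bEntry rows c e) (by omega)]
          rw [bScan_skip rows w e hew hEe, List.append_assoc]
    · rw [show w - c = 0 from by omega]
      simp only [List.range'_zero, List.filter_nil, List.map_nil, List.nil_append]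
      rw [adjF_cons, adjF_single, gA_skip _ _ _ _ _ (by omega),
        bScan_stop _ _ _ hc, List.append_nil]

-- ===== VERDICT (by name: the statement is the Claim_ definition above) =====
theorem maxD_toNat_eq (data : List String) (m : Int)
    (hm : PySem.List.max? (data.map (fun line => PySem.Str.len line)) (fun x => x) = some m) :
    (PySem.List.maxD (data.map (fun line => PySem.Str.len line)) (fun x => x) 0) = m := by
  rw [PySem.List.maxD, hm]
  rfl

theorem get_problem_groups_spec : Claim_equal_get_problem_groups := by
  unfold Claim_equal_get_problem_groups
  intro data _ hpre
  unfold Spec_get_problem_groups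
  unfold Pre_get_problem_groups at hpre
  obtain ⟨m, hm⟩ : ∃ m, PySem.List.max? (data.map (fun line => PySem.Str.len line))
      (fun x => x) = some m := by
    cases hmax : PySem.List.max? (data.map (fun line => PySem.Str.len line)) (fun x => x) with
    | none =>
      rw [PySem.List.max?_eq_none_iff] at hmax
      exact absurd (by simpa using hmax) hpre
    | some m => exact ⟨m, rfl⟩
  have hm0 : 0 ≤ m := by
    have hmem := PySem.List.max?_mem hm
    simp only [List.mem_map] at hmem
    obtain ⟨line, _, rfl⟩ := hmem
    rw [PySem.Str.len_eq]
    omega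
  obtain ⟨w, rfl⟩ : ∃ w : Nat, m = (w : Int) := ⟨m.toNat, by omega⟩
  have hrne : data.map (fun line : String => line.toList) ≠ [] := by
    simpa using hpre
  have hlenle : ∀ r ∈ data.map (fun line : String => line.toList), r.length ≤ w := by
    intro r hr
    obtain ⟨line, hline, rfl⟩ := List.mem_map.mp hr
    have := PySem.List.max?_isMax hm (PySem.Str.len line) (List.mem_map_of_mem hline)
    rw [PySem.Str.len_eq] at this
    omega
  -- right-hand side (B)
  show get_problem_groups data = _
  unfold get_problem_groups_alt
  rw [maxD_toNat_eq data ((w : Nat) : Int) hm, Int.toNat_natCast]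
  -- left-hand side (A)
  unfold get_problem_groups
  rw [hm]
  simp only []
  rw [Int.toNat_natCast]
  -- padded rows as a map over char rows
  rw [show (data.map (fun line => pyLjust line.toList w))
      = (data.map (fun line : String => line.toList)).map (fun r => pyLjust r w) from by
    rw [List.map_map]
    rfl]
  -- the transpose
  rw [pyZipN_eq w ((data.map (fun line : String => line.toList)).map (fun r => pyLjust r w))
      (by simpa using hrne)
      (by intro r hr
          obtain ⟨r', hr', rfl⟩ := List.mem_map.mp hr
          exact pyLjust_length r' w (hlenle r' hr'))]
  -- the empty-column indices
  rw [List.range_eq_range']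
  have hef := enumFilterFst (fun j => ((data.map (fun line : String => line.toList)).map
        (fun r => pyLjust r w)).map (fun r => r.getD j ' '))
      (fun col => col.all (fun c => c == ' ')) w 0
  rw [Nat.cast_zero] at hef
  rw [hef]
  rw [List.filter_congr (fun j hj => colTest_eq (data.map (fun line : String => line.toList))
      w j (by simpa using (List.mem_range'_1.mp hj).2) hlenle)]
  -- boundaries into cons form; walk the pairs; relate to the scan
  rw [List.append_assoc, List.singleton_append]
  refine Eq.trans (foldA_eq (gA (data.map (fun line : String => line.toList)) w)
      ((-1 : Int) ::
        (((List.range' 0 w).filter (colEmptyB (data.map (fun line : String => line.toList)))).map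
          (fun j : Nat => (j : Int)) ++ [((w : Nat) : Int)])) [] (by simp)) ?_
  have hs := scan_eq (data.map (fun line : String => line.toList)) w hlenle w 0 [] (by omega)
  rw [Nat.sub_zero, List.nil_append,
    show (((0 : Nat) : Int) - 1) = (-1 : Int) from by norm_num] at hs
  exact hs
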